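-- pv_equiv track=rewrite | github.com/jakenotjay/rust-warp | python/rust_warp/dask_graph.py | _slice_to_block_indices
-- ===== SOURCE A (Python) =====
-- def _slice_to_block_indices(sr0, sr1, sc0, sc1, row_bounds, col_bounds):
--     """Return list of (block_row, block_col) that overlap the pixel-space slice."""
--     row_blocks = [
--         i for i in range(len(row_bounds) - 1) if row_bounds[i] < sr1 and row_bounds[i + 1] > sr0
--     ]
--     col_blocks = [
--         j for j in range(len(col_bounds) - 1) if col_bounds[j] < sc1 and col_bounds[j + 1] > sc0
--     ]
--     return [(i, j) for i in row_blocks for j in col_blocks]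
-- ===== SOURCE B (Python) =====
-- def _blocks(bounds, lo, hi):
--     """Indices of blocks whose [bounds[k], bounds[k+1]) interval overlaps [lo, hi)."""
--     starts_before_end = {k for k, b in enumerate(bounds[:-1]) if b < hi}
--     ends_after_start = {k for k, b in enumerate(bounds[1:]) if b > lo}
--     return sorted(starts_before_end & ends_after_start)
--
--
-- def _slice_to_block_indices(sr0, sr1, sc0, sc1, row_bounds, col_bounds):
--     """Return list of (block_row, block_col) that overlap the pixel-space slice."""
--     rows = _blocks(row_bounds, sr0, sr1)
--     cols = _blocks(col_bounds, sc0, sc1)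
--     return [(i, j) for i in rows for j in cols]
-- ===== Notes on version B (the rewrite author's own statement) =====
-- stated objective: alternative
-- what changed: per axis, instead of one scan with the combined overlap predicate, B builds two independent index sets (blocks whose left bound precedes the slice end, from bounds[:-1], and blocks whose right bound follows the slice start, from bounds[1:]), intersects them as sets and sorts the intersection, then takes the product of the two sorted index lists
import Mathlib
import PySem

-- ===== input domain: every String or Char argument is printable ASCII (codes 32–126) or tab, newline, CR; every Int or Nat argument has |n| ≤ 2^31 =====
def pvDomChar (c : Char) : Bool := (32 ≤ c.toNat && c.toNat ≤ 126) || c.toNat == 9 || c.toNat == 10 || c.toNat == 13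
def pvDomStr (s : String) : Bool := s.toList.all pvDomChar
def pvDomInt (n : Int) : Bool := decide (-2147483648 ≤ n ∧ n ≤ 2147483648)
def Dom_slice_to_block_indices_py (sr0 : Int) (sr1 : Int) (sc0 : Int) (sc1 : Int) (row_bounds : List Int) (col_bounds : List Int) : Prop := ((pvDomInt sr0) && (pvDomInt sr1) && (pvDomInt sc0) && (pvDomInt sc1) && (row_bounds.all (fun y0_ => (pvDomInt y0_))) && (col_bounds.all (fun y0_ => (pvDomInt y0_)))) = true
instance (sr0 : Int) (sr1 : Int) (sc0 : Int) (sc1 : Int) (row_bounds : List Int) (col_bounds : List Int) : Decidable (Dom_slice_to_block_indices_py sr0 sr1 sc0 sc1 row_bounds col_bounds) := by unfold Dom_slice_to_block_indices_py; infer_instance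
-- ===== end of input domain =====

-- B replaces A's per-axis scans with the combined overlap predicate by set algebra: two
-- independent index sets per axis (left bounds before the slice end, right bounds after the
-- slice start), intersected and sorted (objective: alternative decomposition, same cost).

-- ===== PORT A =====
def slice_to_block_indices_py (sr0 : Int) (sr1 : Int) (sc0 : Int) (sc1 : Int) (row_bounds : List Int) (col_bounds : List Int) : List (Int × Int) :=
  let row_blocks := (PySem.List.pyRange 0 ((row_bounds.length : Int) - 1) 1).filter
    (fun i => decide (PySem.List.pyGetD row_bounds i 0 < sr1) &&
              decide (PySem.List.pyGetD row_bounds (i + 1) 0 > sr0))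
  let col_blocks := (PySem.List.pyRange 0 ((col_bounds.length : Int) - 1) 1).filter
    (fun j => decide (PySem.List.pyGetD col_bounds j 0 < sc1) &&
              decide (PySem.List.pyGetD col_bounds (j + 1) 0 > sc0))
  row_blocks.flatMap (fun i => col_blocks.map (fun j => (i, j)))

-- ===== PORT B =====
-- _blocks: two set comprehensions over enumerate(bounds[:-1]) / enumerate(bounds[1:]),
-- set intersection (&), then sorted(...).
def pv_blocks (bounds : List Int) (lo : Int) (hi : Int) : List Int :=
  let starts_before_end : PySem.Set Int := PySem.Set.ofList
    (((PySem.List.enumerate (PySem.List.slice bounds none (some (-1))) 0).filter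
        (fun p => decide (p.2 < hi))).map (·.1))
  let ends_after_start : PySem.Set Int := PySem.Set.ofList
    (((PySem.List.enumerate (PySem.List.slice bounds (some 1) none) 0).filter
        (fun p => decide (p.2 > lo))).map (·.1))
  PySem.List.sorted (PySem.Set.inter starts_before_end ends_after_start) (fun x => x) false

def slice_to_block_indices_py_alt (sr0 : Int) (sr1 : Int) (sc0 : Int) (sc1 : Int) (row_bounds : List Int) (col_bounds : List Int) : List (Int × Int) :=
  let rows := pv_blocks row_bounds sr0 sr1
  let cols := pv_blocks col_bounds sc0 sc1
  rows.flatMap (fun i => cols.map (fun j => (i, j)))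

-- ===== PRECONDITION & SPEC =====
def Spec_slice_to_block_indices_py (sr0 : Int) (sr1 : Int) (sc0 : Int) (sc1 : Int) (row_bounds : List Int) (col_bounds : List Int) (out : List (Int × Int)) : Prop := out = slice_to_block_indices_py_alt sr0 sr1 sc0 sc1 row_bounds col_bounds
instance (sr0 : Int) (sr1 : Int) (sc0 : Int) (sc1 : Int) (row_bounds : List Int) (col_bounds : List Int) (out : List (Int × Int)) : Decidable (Spec_slice_to_block_indices_py sr0 sr1 sc0 sc1 row_bounds col_bounds out) := by unfold Spec_slice_to_block_indices_py; infer_instance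

-- ===== CLAIM (what is proved, stated in full; the proofs are below) =====
def Claim_equal_slice_to_block_indices_py : Prop := ∀ (sr0 : Int) (sr1 : Int) (sc0 : Int) (sc1 : Int) (row_bounds : List Int) (col_bounds : List Int), Dom_slice_to_block_indices_py sr0 sr1 sc0 sc1 row_bounds col_bounds → Spec_slice_to_block_indices_py sr0 sr1 sc0 sc1 row_bounds col_bounds (slice_to_block_indices_py sr0 sr1 sc0 sc1 row_bounds col_bounds)

-- ===== LEMMAS AND PROOFS =====

-- indices of the elements of xs passing a test = the filtered index range
theorem pv_side_eq (xs : List Int) (c : Int → Bool) :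
    ((PySem.List.enumerate xs 0).filter (fun p => c p.2)).map (·.1)
    = (PySem.List.pyRange 0 (xs.length : Int) 1).filter
        (fun j => c (PySem.List.pyGetD xs j 0)) := by
  rw [PySem.List.enumerate_eq_map_pyRange xs (0 : Int)]
  rw [List.filter_map, List.map_map]
  rw [show ((fun (x : Int × Int) => x.1) ∘ fun j => (j, PySem.List.pyGetD xs j 0)) = id from rfl,
    List.map_id]
  simp only [PySem.List.len_eq]
  rfl

-- B's sorted set intersection for one axis IS A's filtered index scan for that axis.
theorem pv_blocks_eq (xs : List Int) (s t : Int) :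
    pv_blocks xs s t
    = (PySem.List.pyRange 0 ((xs.length : Int) - 1) 1).filter
        (fun i => decide (PySem.List.pyGetD xs i 0 < t) &&
                  decide (PySem.List.pyGetD xs (i + 1) 0 > s)) := by
  unfold pv_blocks
  rw [PySem.List.slice_to_neg_one, PySem.List.slice_from_one]
  rw [pv_side_eq xs.dropLast (fun v => decide (v < t)), pv_side_eq xs.tail (fun v => decide (s < v))]
  have hF : List.Pairwise (· < ·)
      ((PySem.List.pyRange 0 ((xs.length : Int) - 1) 1).filter
        (fun i => decide (PySem.List.pyGetD xs i 0 < t) &&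
                  decide (PySem.List.pyGetD xs (i + 1) 0 > s))) :=
    (PySem.List.pairwise_lt_pyRange_one 0 _).filter _
  have hI := PySem.Set.nodup_inter
    (s := PySem.Set.ofList ((PySem.List.pyRange 0 (xs.dropLast.length : Int) 1).filter
        (fun j => decide (PySem.List.pyGetD xs.dropLast j 0 < t))))
    (t := PySem.Set.ofList ((PySem.List.pyRange 0 (xs.tail.length : Int) 1).filter
        (fun j => decide (s < PySem.List.pyGetD xs.tail j 0))))
    (PySem.Set.nodup_ofList _)
  apply PySem.List.sorted_eq_of_perm_of_pairwise_lt _ _ _ _ hF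
  apply (List.perm_ext_iff_of_nodup (hF.imp ne_of_lt) hI).mpr
  intro x
  rw [PySem.Set.mem_inter, PySem.Set.mem_ofList, PySem.Set.mem_ofList,
    List.mem_filter, List.mem_filter, List.mem_filter,
    PySem.List.mem_pyRange_one, PySem.List.mem_pyRange_one, PySem.List.mem_pyRange_one]
  simp only [Bool.and_eq_true, decide_eq_true_eq, gt_iff_lt]
  have hdl : xs.dropLast.length = xs.length - 1 := by simp
  have htl : xs.tail.length = xs.length - 1 := List.length_tail
  constructor
  · rintro ⟨⟨h0, h1'⟩, h2, h3⟩
    have hx : x.toNat < xs.length - 1 := by omega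
    rw [PySem.List.pyGetD_eq_getElem xs 0 h0 (by omega)] at h2
    rw [PySem.List.pyGetD_eq_getElem xs 0 (by omega) (by omega)] at h3
    refine ⟨⟨⟨h0, by omega⟩, ?_⟩, ⟨h0, by omega⟩, ?_⟩
    · rw [PySem.List.pyGetD_eq_getElem xs.dropLast 0 h0 (by omega)]
      rw [List.getElem_dropLast]
      exact h2
    · rw [PySem.List.pyGetD_eq_getElem xs.tail 0 h0 (by omega)]
      rw [List.getElem_tail]
      simp only [show (x + 1).toNat = x.toNat + 1 from by omega] at h3
      exact h3
  · rintro ⟨⟨⟨h0, h1'⟩, h2⟩, ⟨_, _⟩, h3⟩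
    have hx : x.toNat < xs.length - 1 := by omega
    rw [PySem.List.pyGetD_eq_getElem xs.dropLast 0 h0 (by omega), List.getElem_dropLast] at h2
    rw [PySem.List.pyGetD_eq_getElem xs.tail 0 h0 (by omega), List.getElem_tail] at h3
    refine ⟨⟨h0, by omega⟩, ?_, ?_⟩
    · rw [PySem.List.pyGetD_eq_getElem xs 0 h0 (by omega)]; exact h2
    · rw [PySem.List.pyGetD_eq_getElem xs 0 (by omega) (by omega)]
      simp only [show (x + 1).toNat = x.toNat + 1 from by omega]
      exact h3

-- ===== VERDICT (by name: the statement is the Claim_ definition above) =====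
theorem slice_to_block_indices_py_spec : Claim_equal_slice_to_block_indices_py := by
  intro sr0 sr1 sc0 sc1 rb cb _
  unfold Spec_slice_to_block_indices_py
  simp only [slice_to_block_indices_py, slice_to_block_indices_py_alt]
  rw [pv_blocks_eq rb sr0 sr1, pv_blocks_eq cb sc0 sc1]
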